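-- pv_equiv track=rewrite | github.com/norasoraa/INF100 | lab7/uke_07_oppg_3.py | sum_row
-- ===== SOURCE A (Python) =====
-- def sum_row(grid):
--     sum_row = []
--     for row in range(len(grid)):
--         row_1 = grid[row]
--         sum = 0
--         for i in range(len(row_1)):
--             sum += row_1[i]
--         sum_row.append(sum)
--     for i in range(len(sum_row)-1):
--         if sum_row[i] == sum_row[i+1]:
--             i += 1
--         else:
--             return False
--     return True
-- ===== SOURCE B (Python) =====
-- def sum_row(grid):
--     # Single fused pass: fix the first row's sum as the target, then scan the
--     # remaining rows, summing each and bailing out on the first mismatch.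
--     # No list of row sums is ever built (A builds one, then rescans it pairwise).
--     it = iter(grid)
--     first = next(it, None)
--     if first is None:
--         return True
--     target = sum(first)
--     for row in it:
--         if sum(row) != target:
--             return False
--     return True
-- ===== Notes on version B (the rewrite author's own statement) =====
-- stated objective: alternative
-- what changed: A stages two passes (build the full list of row sums via index loops, then rescan it comparing consecutive entries); B is a single fused pass with O(1) extra state that fixes the first row's sum as a target and compares each subsequent row's sum (builtin sum) to it as it is computed, exiting on the first mismatch and never materialising the sums list.
import Mathlib
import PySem

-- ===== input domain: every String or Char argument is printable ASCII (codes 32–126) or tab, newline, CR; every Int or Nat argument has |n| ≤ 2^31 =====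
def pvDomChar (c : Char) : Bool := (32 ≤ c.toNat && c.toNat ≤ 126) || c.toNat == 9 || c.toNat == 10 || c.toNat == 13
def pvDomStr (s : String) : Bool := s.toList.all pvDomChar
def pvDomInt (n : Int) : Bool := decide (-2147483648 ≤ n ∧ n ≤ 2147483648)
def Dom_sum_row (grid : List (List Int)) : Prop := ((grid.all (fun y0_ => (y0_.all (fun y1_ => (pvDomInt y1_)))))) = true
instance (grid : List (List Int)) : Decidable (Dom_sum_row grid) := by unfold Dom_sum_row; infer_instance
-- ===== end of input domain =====

-- B replaces A's two staged passes (build the list of all row sums, then scan it pairwise)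
-- by a single fused pass comparing each row's sum to the first row's sum, with early exit
-- and no intermediate list (objective: alternative; same asymptotic cost).

-- ===== PORT A =====
-- the second loop of A: 'for i in range(len(sum_row)-1): if sum_row[i] == sum_row[i+1]: … else: return False'
def sumRowPairLoop (sums : List Int) : List Int → Bool
  | [] => true
  | i :: rest =>
    if PySem.List.pyGetD sums i 0 = PySem.List.pyGetD sums (i + 1) 0 then
      sumRowPairLoop sums rest
    else
      false

def sum_row (grid : List (List Int)) : Bool :=
  let sums :=
    (PySem.List.pyRange 0 (PySem.List.len grid)).foldl
      (fun acc row =>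
        let row1 := PySem.List.pyGetD grid row []
        let s :=
          (PySem.List.pyRange 0 (PySem.List.len row1)).foldl
            (fun s i => s + PySem.List.pyGetD row1 i 0) 0
        acc ++ [s]) []
  sumRowPairLoop sums (PySem.List.pyRange 0 (PySem.List.len sums - 1))

-- ===== PORT B =====
-- B's for-loop over the remaining rows: 'for row in it: if sum(row) != target: return False'
def sumRowScan (target : Int) : List (List Int) → Bool
  | [] => true
  | row :: rest => if row.sum ≠ target then false else sumRowScan target rest

def sum_row_alt (grid : List (List Int)) : Bool :=
  match grid with
  | [] => true
  | first :: rest => sumRowScan first.sum rest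

-- ===== PRECONDITION & SPEC =====
def Spec_sum_row (grid : List (List Int)) (out : Bool) : Prop := out = sum_row_alt grid
instance (grid : List (List Int)) (out : Bool) : Decidable (Spec_sum_row grid out) := by unfold Spec_sum_row; infer_instance

-- ===== CLAIM (what is proved, stated in full; the proofs are below) =====
def Claim_equal_sum_row : Prop := ∀ (grid : List (List Int)), Dom_sum_row grid → Spec_sum_row grid (sum_row grid)

-- ===== LEMMAS AND PROOFS =====

-- all members of a list are pairwise equal
def AllEq (xs : List Int) : Prop := ∀ y ∈ xs, ∀ z ∈ xs, y = z

-- A's pair loop, started at index i, succeeds iff xs.drop i has pairwise-equal members.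
lemma pairLoop_drop (xs : List Int) (i : Nat) :
    sumRowPairLoop xs (PySem.List.pyRange (i : Int) ((xs.length : Int) - 1)) = true ↔
      AllEq (xs.drop i) := by
  by_cases h : (i : Int) < (xs.length : Int) - 1
  · rw [PySem.List.pyRange_one_cons h]
    have hi : i < xs.length := by omega
    have hi1 : i + 1 < xs.length := by omega
    have hxs : xs.drop i = xs[i] :: xs.drop (i + 1) := (List.drop_eq_getElem_cons hi)
    have hxs1 : xs.drop (i + 1) = xs[i + 1] :: xs.drop (i + 2) := (List.drop_eq_getElem_cons hi1)
    have hget : PySem.List.pyGetD xs (i : Int) 0 = xs[i] := by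
      rw [PySem.List.pyGetD_eq_getElem xs 0 (by omega) (by exact_mod_cast hi)]
      simp
    have hget1 : PySem.List.pyGetD xs ((i : Int) + 1) 0 = xs[i + 1] := by
      rw [PySem.List.pyGetD_eq_getElem xs 0 (by omega) (by exact_mod_cast hi1)]
      have : ((i : Int) + 1).toNat = i + 1 := by omega
      simp only [this]
    have ih := pairLoop_drop xs (i + 1)
    rw [sumRowPairLoop]
    rw [hget, hget1]
    split_ifs with heq
    · rw [show ((i : Int) + 1) = ((i + 1 : Nat) : Int) by push_cast; ring] at *
      rw [ih, hxs]
      constructor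
      · intro hall y hy z hz
        have mem' : ∀ w, w ∈ xs[i] :: xs.drop (i + 1) → w ∈ xs.drop (i + 1) := by
          intro w hw
          rcases List.mem_cons.mp hw with rfl | hw
          · rw [hxs1, heq]; exact List.mem_cons_self
          · exact hw
        exact hall y (mem' y hy) z (mem' z hz)
      · intro hall y hy z hz
        exact hall y (List.mem_cons_of_mem _ hy) z (List.mem_cons_of_mem _ hz)
    · simp only [false_iff]
      intro hall
      exact heq (hall xs[i] (by rw [hxs]; exact List.mem_cons_self)
        xs[i + 1] (by rw [hxs, hxs1]; exact List.mem_cons_of_mem _ List.mem_cons_self))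
  · rw [PySem.List.pyRange_one_eq_nil (by omega)]
    simp only [sumRowPairLoop, true_iff]
    have hlen : (xs.drop i).length ≤ 1 := by
      simp only [List.length_drop]; omega
    intro y hy z hz
    match hd : xs.drop i, hlen' : (xs.drop i).length with
    | [], _ => simp [hd] at hy
    | [a], _ =>
      rw [hd] at hy hz
      simp at hy hz; omega
    | a :: b :: t, _ => rw [hd] at hlen; simp at hlen
termination_by xs.length - i

-- B's scan succeeds iff every remaining row sums to the target.
lemma scan_iff (t : Int) (rows : List (List Int)) :
    sumRowScan t rows = true ↔ ∀ r ∈ rows, r.sum = t := by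
  induction rows with
  | nil => simp [sumRowScan]
  | cons r rest ih =>
    rw [sumRowScan]
    split_ifs with h
    · simp only [false_iff]
      intro hall; exact h (hall r List.mem_cons_self)
    · rw [ih]
      constructor
      · intro hall y hy
        rcases List.mem_cons.mp hy with rfl | hy
        · omega
        · exact hall y hy
      · intro hall y hy; exact hall y (List.mem_cons_of_mem _ hy)

-- A's summation phase builds exactly the list of row sums.
lemma sums_eq (grid : List (List Int)) :
    (PySem.List.pyRange 0 ((grid.length : Int))).foldl
      (fun acc row =>
        acc ++ [(PySem.List.pyRange 0 (((PySem.List.pyGetD grid row []).length : Int))).foldl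
          (fun s i => s + PySem.List.pyGetD (PySem.List.pyGetD grid row []) i 0) 0]) [] =
    grid.map (fun row => row.sum) := by
  rw [PySem.List.foldl_pyRange_zero_pyGetD' grid []
    (fun acc row1 =>
      acc ++ [(PySem.List.pyRange 0 ((row1.length : Int))).foldl
        (fun s i => s + PySem.List.pyGetD row1 i 0) 0]) []]
  rw [PySem.List.foldl_append_singleton_eq_map]
  simp only [List.nil_append]
  apply List.map_congr_left
  intro row _
  rw [PySem.List.foldl_pyRange_zero_pyGetD' row 0 (fun s x => s + x) 0]
  rw [List.sum_eq_foldl]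

-- ===== VERDICT (by name: the statement is the Claim_ definition above) =====
theorem sum_row_spec : Claim_equal_sum_row := by
  intro grid _
  show sum_row grid = sum_row_alt grid
  rw [Bool.eq_iff_iff]
  unfold sum_row
  simp only [PySem.List.len_eq]
  rw [sums_eq grid]
  have h := pairLoop_drop (grid.map (fun row => row.sum)) 0
  simp only [Nat.cast_zero, List.drop_zero] at h
  rw [h]
  cases grid with
  | nil =>
    simp [sum_row_alt, AllEq]
  | cons first rest =>
    unfold sum_row_alt
    rw [scan_iff]
    simp only [List.map_cons]
    constructor
    · intro hall r hr
      exact hall (r.sum) (List.mem_cons_of_mem _ (List.mem_map_of_mem hr))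
        first.sum List.mem_cons_self
    · intro hall y hy z hz
      have key : ∀ w, w ∈ first.sum :: rest.map (fun row => row.sum) → w = first.sum := by
        intro w hw
        rcases List.mem_cons.mp hw with rfl | hw
        · rfl
        · obtain ⟨r, hr, rfl⟩ := List.mem_map.mp hw
          exact hall r hr
      rw [key y hy, key z hz]
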